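-- pv_equiv track=rewrite | github.com/GodDB/kma-api | kma_asos.py | split_marker_text
-- ===== SOURCE A (Python) =====
-- def split_marker_text(text: str) -> tuple[list[str], list[str], list[str]]:
--     header_lines: list[str] = []
--     data_lines: list[str] = []
--     footer_lines: list[str] = []
--     seen_data = False
--
--     for raw_line in text.splitlines():
--         line = raw_line.rstrip("\r")
--         if not line:
--             continue
--
--         if line.startswith("#7777END"):
--             footer_lines.append(line)
--             continue
--
--         if line.startswith("#") and not seen_data:
--             header_lines.append(line)
--             continue
--
--         if line.startswith("#"):
--             footer_lines.append(line)
--             continue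
--
--         seen_data = True
--         data_lines.append(line)
--
--     return header_lines, data_lines, footer_lines
-- ===== SOURCE B (Python) =====
-- def split_marker_text(text: str) -> tuple[list[str], list[str], list[str]]:
--     lines = [s for s in (raw.rstrip("\r") for raw in text.splitlines()) if s]
--     n = 0
--     while n < len(lines) and lines[n].startswith("#"):
--         n += 1
--     pre, post = lines[:n], lines[n:]
--     header = [l for l in pre if not l.startswith("#7777END")]
--     data = [l for l in post if not l.startswith("#")]
--     footer = [l for l in pre if l.startswith("#7777END")] + [l for l in post if l.startswith("#")]
--     return header, data, footer
-- ===== Notes on version B (the rewrite author's own statement) =====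
-- stated objective: simpler
-- what changed: Replaces the stateful single loop with a seen_data flag by normalizing the lines once, splitting them at the first data line (the first line without a comment-marker prefix), and building each of the three sections with one declarative comprehension over the prefix/suffix.
import Mathlib
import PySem

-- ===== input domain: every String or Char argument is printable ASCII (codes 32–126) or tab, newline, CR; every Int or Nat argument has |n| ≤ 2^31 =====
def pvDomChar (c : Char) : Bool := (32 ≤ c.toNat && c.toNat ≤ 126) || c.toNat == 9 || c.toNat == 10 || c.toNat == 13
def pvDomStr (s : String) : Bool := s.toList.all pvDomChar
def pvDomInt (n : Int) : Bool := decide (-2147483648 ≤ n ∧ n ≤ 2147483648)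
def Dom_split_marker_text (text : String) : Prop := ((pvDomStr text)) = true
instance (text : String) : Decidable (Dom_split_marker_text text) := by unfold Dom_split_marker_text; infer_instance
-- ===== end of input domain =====

-- B replaces A's stateful flag loop by a normalize-once / split-at-first-data-line /
-- three-comprehensions decomposition (objective: simpler).


-- ===== PORT A =====
-- raw_line.rstrip("\r"): drop trailing '\r' characters (ported by hand, exact)
def pvRstripCR (s : String) : String := String.ofList ((s.toList.reverse.dropWhile (· == '\r')).reverse)

-- one iteration of A's loop body, after the 'if not line: continue' guard
def pvStepA (st : (List String × List String × List String) × Bool) (line : String) :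
    (List String × List String × List String) × Bool :=
  let ((h, d, f), seen) := st
  if PySem.Str.startswith line "#7777END" then ((h, d, f ++ [line]), seen)
  else if PySem.Str.startswith line "#" && !seen then ((h ++ [line], d, f), seen)
  else if PySem.Str.startswith line "#" then ((h, d, f ++ [line]), seen)
  else ((h, d ++ [line], f), true)

def split_marker_text (text : String) : List String × List String × List String :=
  let r := (PySem.Str.splitlines text).foldl
    (fun st raw =>
      let line := pvRstripCR raw
      if line == "" then st else pvStepA st line)
    (([], [], []), false)
  r.1

-- ===== PORT B =====
def split_marker_text_alt (text : String) : List String × List String × List String :=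
  let lines := ((PySem.Str.splitlines text).map pvRstripCR).filter (fun s => !(s == ""))
  -- the while loop advancing n over leading '#' lines = split at the first non-'#' line
  let pre := lines.takeWhile (fun l => PySem.Str.startswith l "#")
  let post := lines.dropWhile (fun l => PySem.Str.startswith l "#")
  (pre.filter (fun l => !PySem.Str.startswith l "#7777END"),
   post.filter (fun l => !PySem.Str.startswith l "#"),
   pre.filter (fun l => PySem.Str.startswith l "#7777END")
     ++ post.filter (fun l => PySem.Str.startswith l "#"))

-- ===== PRECONDITION & SPEC =====
def Spec_split_marker_text (text : String) (out : List String × List String × List String) : Prop := out = split_marker_text_alt text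
instance (text : String) (out : List String × List String × List String) : Decidable (Spec_split_marker_text text out) := by unfold Spec_split_marker_text; infer_instance

-- ===== CLAIM (what is proved, stated in full; the proofs are below) =====
def Claim_equal_split_marker_text : Prop := ∀ (text : String), Dom_split_marker_text text → Spec_split_marker_text text (split_marker_text text)

-- ===== LEMMAS AND PROOFS =====

-- a line starting with "#7777END" also starts with "#"
theorem pv_end_imp_hash (l : String) (h : PySem.Str.startswith l "#7777END" = true) :
    PySem.Str.startswith l "#" = true := by
  simp only [PySem.Str.startswith_eq] at h ⊢
  rw [PySem.Chars.startswith_iff] at h ⊢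
  exact List.IsPrefix.trans (by decide) h

-- A's loop with seen = true: everything '#' goes to footer, the rest to data
theorem pv_foldA_true (L : List String) (h d f : List String) :
    L.foldl pvStepA ((h, d, f), true)
      = ((h, d ++ L.filter (fun l => !PySem.Str.startswith l "#"),
           f ++ L.filter (fun l => PySem.Str.startswith l "#")), true) := by
  induction L generalizing d f with
  | nil => simp
  | cons x xs ih =>
    by_cases hE : PySem.Str.startswith x "#7777END" = true
    · have hH := pv_end_imp_hash x hE
      simp [PySem.Str.startswith_eq] at hE hH
      simp [pvStepA, hE, hH, ih]
    · by_cases hH : PySem.Str.startswith x "#" = true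
      · simp [PySem.Str.startswith_eq] at hE hH
        simp [pvStepA, hE, hH, ih]
      · simp [PySem.Str.startswith_eq] at hE hH
        simp [pvStepA, hE, hH, ih]

-- A's loop with seen = false computes B's three comprehensions
theorem pv_foldA_false (L : List String) (h d f : List String) :
    (L.foldl pvStepA ((h, d, f), false)).1
      = (h ++ (L.takeWhile (fun l => PySem.Str.startswith l "#")).filter
            (fun l => !PySem.Str.startswith l "#7777END"),
         d ++ (L.dropWhile (fun l => PySem.Str.startswith l "#")).filter
            (fun l => !PySem.Str.startswith l "#"),
         f ++ (L.takeWhile (fun l => PySem.Str.startswith l "#")).filter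
            (fun l => PySem.Str.startswith l "#7777END")
           ++ (L.dropWhile (fun l => PySem.Str.startswith l "#")).filter
            (fun l => PySem.Str.startswith l "#")) := by
  induction L generalizing h d f with
  | nil => simp
  | cons x xs ih =>
    by_cases hE : PySem.Str.startswith x "#7777END" = true
    · have hH := pv_end_imp_hash x hE
      simp [PySem.Str.startswith_eq] at hE hH
      simp [pvStepA, hE, hH, ih]
    · by_cases hH : PySem.Str.startswith x "#" = true
      · simp [PySem.Str.startswith_eq] at hE hH
        simp [pvStepA, hE, hH, ih]
      · simp [PySem.Str.startswith_eq] at hE hH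
        simp [pvStepA, hE, hH, pv_foldA_true]

-- ===== VERDICT (by name: the statement is the Claim_ definition above) =====
theorem split_marker_text_spec : Claim_equal_split_marker_text := by
  intro text _
  unfold Spec_split_marker_text split_marker_text split_marker_text_alt
  rw [show (fun (st : (List String × List String × List String) × Bool) raw =>
        let line := pvRstripCR raw
        if line == "" then st else pvStepA st line)
      = (fun st raw => if !(pvRstripCR raw == "") then pvStepA st (pvRstripCR raw) else st) from by
        funext st raw; by_cases hr : pvRstripCR raw == ""
        · simp [hr]
        · simp [hr]]
  rw [show ∀ (L : List String) (init : (List String × List String × List String) × Bool),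
        L.foldl (fun st raw => if !(pvRstripCR raw == "") then pvStepA st (pvRstripCR raw) else st) init
        = ((L.map pvRstripCR).filter (fun s => !(s == ""))).foldl pvStepA init from by
        intro L init
        rw [List.filter_map, List.foldl_map, List.foldl_filter]
        simp [Function.comp]]
  simp [pv_foldA_false]
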